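-- pv_equiv track=rewrite | github.com/Serennna/app_automation | utils/common_tools.py | get_expected_interests
-- ===== SOURCE A (Python) =====
-- def get_expected_interests(a, b):
--     new_list = a
--     for item in b:
--         if item not in new_list:
--             new_list.append(item)
--         else:
--             new_list.remove(item)
--
--     return new_list
-- ===== SOURCE B (Python) =====
-- def get_expected_interests(a, b):
--     # Counting algorithm, O(n+m): per value v the toggle sequence only depends on
--     # count(a,v) and count(b,v); originals survive past the first count(b,v)
--     # occurrences, and an appended copy survives iff count(b,v)-count(a,v) is
--     # positive and odd, placed at v's last occurrence in b.
--     ca = {}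
--     for v in a:
--         ca[v] = ca.get(v, 0) + 1
--     cb = {}
--     for v in b:
--         cb[v] = cb.get(v, 0) + 1
--     budget = dict(cb)
--     kept = []
--     for v in a:
--         if budget.get(v, 0) > 0:
--             budget[v] = budget[v] - 1
--         else:
--             kept.append(v)
--     seen = set()
--     tail_rev = []
--     for v in reversed(b):
--         if v not in seen:
--             seen.add(v)
--             d = cb[v] - ca.get(v, 0)
--             if d > 0 and d % 2 == 1:
--                 tail_rev.append(v)
--     tail_rev.reverse()
--     return kept + tail_rev
-- ===== Notes on version B (the rewrite author's own statement) =====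
-- stated objective: faster
-- what changed: A simulates the toggle sequentially with an O(n*m) membership-scan-and-remove loop over the current list; B computes the result directly from per-value counts (dict counters): originals survive past the first count(b,v) occurrences, and an appended copy survives iff count(b,v)-count(a,v) is positive and odd, placed at v's last occurrence in b.
import Mathlib
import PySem

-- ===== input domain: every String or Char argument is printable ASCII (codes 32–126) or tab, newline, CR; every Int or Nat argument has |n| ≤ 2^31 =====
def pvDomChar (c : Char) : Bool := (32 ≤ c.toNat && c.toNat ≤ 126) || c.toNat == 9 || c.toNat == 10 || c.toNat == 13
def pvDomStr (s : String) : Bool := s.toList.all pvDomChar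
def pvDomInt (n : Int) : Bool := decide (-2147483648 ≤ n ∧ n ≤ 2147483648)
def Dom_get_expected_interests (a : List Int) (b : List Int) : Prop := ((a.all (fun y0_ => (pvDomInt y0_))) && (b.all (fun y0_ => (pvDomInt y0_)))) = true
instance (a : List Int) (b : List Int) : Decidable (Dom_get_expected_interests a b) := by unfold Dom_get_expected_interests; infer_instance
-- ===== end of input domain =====

-- B replaces A's quadratic toggle loop (membership scan + list.remove per item of b) by an
-- O(n+m) counting algorithm. The equivalence is about the RETURN value only: Python A mutates
-- the argument list `a` in place (appends/removes on it) and B does not.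

-- ===== PORT A =====
def get_expected_interests (a : List Int) (b : List Int) : List Int :=
  b.foldl (fun new_list item =>
    if !(new_list.contains item) then new_list ++ [item]
    else (PySem.List.remove? new_list item).getD new_list) a
    -- `remove?` is guarded by the membership test, so `getD` never takes its default

-- ===== PORT B =====
def get_expected_interests_alt (a : List Int) (b : List Int) : List Int :=
  let ca : PySem.Dict Int Int := a.foldl (fun d v => d.insert v (d.getD v 0 + 1)) PySem.Dict.empty
  let cb : PySem.Dict Int Int := b.foldl (fun d v => d.insert v (d.getD v 0 + 1)) PySem.Dict.empty
  let budget := cb  -- Python's `dict(cb)` copy; dicts are functional here, so the copy is `cb` itself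
  let kb := a.foldl (fun (st : PySem.Dict Int Int × List Int) v =>
      if st.1.getD v 0 > 0 then (st.1.insert v (st.1.getD v 0 - 1), st.2)
      else (st.1, st.2 ++ [v])) (budget, [])
  let tb := b.reverse.foldl (fun (st : PySem.Set Int × List Int) v =>
      if !(PySem.Set.contains st.1 v) then
        (PySem.Set.add st.1 v,
         -- cb[v] is a plain index in Python; v ∈ b here, so the key is present and getD is exact
         if cb.getD v 0 - ca.getD v 0 > 0 ∧ PySem.Int.mod (cb.getD v 0 - ca.getD v 0) 2 = 1
         then st.2 ++ [v] else st.2)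
      else st) (PySem.Set.empty, [])
  kb.2 ++ tb.2.reverse

-- ===== PRECONDITION & SPEC =====
def Spec_get_expected_interests (a : List Int) (b : List Int) (out : List Int) : Prop := out = get_expected_interests_alt a b
instance (a : List Int) (b : List Int) (out : List Int) : Decidable (Spec_get_expected_interests a b out) := by unfold Spec_get_expected_interests; infer_instance

-- ===== CLAIM (what is proved, stated in full; the proofs are below) =====
def Claim_equal_get_expected_interests : Prop := ∀ (a : List Int) (b : List Int), Dom_get_expected_interests a b → Spec_get_expected_interests a b (get_expected_interests a b)

-- ===== LEMMAS AND PROOFS =====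

-- `skipN a f` = a with the first `f v` occurrences of each value v dropped
def skipN : List Int → (Int → Nat) → List Int
  | [], _ => []
  | x :: xs, f => if f x > 0 then skipN xs (fun v => if v = x then f x - 1 else f v) else x :: skipN xs f

-- the last occurrence of each value, in order of last occurrence
def lastOnly : List Int → List Int
  | [] => []
  | x :: xs => if x ∈ xs then lastOnly xs else x :: lastOnly xs

-- the first occurrence of each value not already in `s`, in order
def firstOnly' : List Int → List Int → List Int
  | [], _ => []
  | v :: vs, s => if v ∈ s then firstOnly' vs s else v :: firstOnly' vs (s ++ [v])

-- the condition for an appended copy of v to survive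
def qN (a p : List Int) (v : Int) : Bool :=
  decide (a.count v < p.count v ∧ (p.count v - a.count v) % 2 = 1)

theorem skipN_zero (a : List Int) : skipN a (fun _ => 0) = a := by
  induction a with
  | nil => rfl
  | cons x xs ih => simp [skipN, ih]

theorem mem_skipN (a : List Int) (f : Int → Nat) (v : Int) : v ∈ skipN a f ↔ f v < a.count v := by
  induction a generalizing f with
  | nil => simp [skipN]
  | cons x xs ih =>
    by_cases hvx : v = x
    · subst hvx
      by_cases hx : f v > 0
      · simp only [skipN, if_pos hx, ih]; simp; omega
      · simp only [skipN, if_neg hx, List.mem_cons, ih]; simp; omega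
    · have hxv : ¬ x = v := fun e => hvx e.symm
      by_cases hx : f x > 0
      · simp only [skipN, if_pos hx, ih]; simp [hvx, hxv]
      · simp only [skipN, if_neg hx, List.mem_cons, ih]; simp [hvx, hxv]

theorem erase_skipN (a : List Int) (f : Int → Nat) (v : Int) (h : f v < a.count v) :
    (skipN a f).erase v = skipN a (fun w => if w = v then f v + 1 else f w) := by
  induction a generalizing f with
  | nil => simp at h
  | cons x xs ih =>
    by_cases hvx : x = v
    · subst hvx
      have hcc : List.count x (x :: xs) = List.count x xs + 1 := by simp
      by_cases hx : f x > 0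
      · rw [skipN, if_pos hx, skipN, if_pos (by simp)]
        rw [ih _ (by simp; omega)]
        congr 1; funext w; by_cases hw : w = x <;> simp [hw]; omega
      · have hf0 : f x = 0 := by omega
        rw [skipN, if_neg hx, List.erase_cons_head, skipN, if_pos (by simp)]
        congr 1; funext w; by_cases hw : w = x <;> simp [hw, hf0]
    · have hxv : ¬ v = x := fun e => hvx e.symm
      have hcc : List.count v (x :: xs) = List.count v xs := by simp [hvx]
      have h' : f v < List.count v xs := by omega
      by_cases hx : f x > 0
      · rw [skipN, if_pos hx, skipN, if_pos (by simpa [hvx] using hx)]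
        rw [ih _ (by simpa [hxv] using h')]
        congr 1; funext w
        by_cases hw1 : w = x <;> by_cases hw2 : w = v <;> simp [hw1, hw2] <;> simp_all
      · rw [skipN, if_neg hx, List.erase_cons_tail (by simp [hvx]), skipN, if_neg (by simpa [hvx] using hx)]
        rw [ih _ h']


theorem skipN_sat (a : List Int) (f : Int → Nat) (v : Int) (h : a.count v ≤ f v) :
    skipN a (fun w => if w = v then f v + 1 else f w) = skipN a f := by
  induction a generalizing f with
  | nil => rfl
  | cons x xs ih =>
    by_cases hvx : x = v
    · subst hvx
      have hcc : List.count x (x :: xs) = List.count x xs + 1 := by simp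
      have hf1 : 1 ≤ f x := by omega
      simp only [skipN, if_true]
      rw [if_pos (show f x + 1 > 0 by omega), if_pos (show f x > 0 by omega)]
      have h'' : List.count x xs ≤ (fun u => if u = x then f x - 1 else f u) x := by simp; omega
      have step := ih (fun u => if u = x then f x - 1 else f u) h''
      have he2 : (fun v' => if v' = x then f x + 1 - 1 else if v' = x then f x + 1 else f v')
          = (fun w => if w = x then (fun u => if u = x then f x - 1 else f u) x + 1 else (fun u => if u = x then f x - 1 else f u) w) := by
        funext w; by_cases hw : w = x <;> simp [hw]; omega
      rw [he2, step]
    · have hxv : ¬ v = x := fun e => hvx e.symm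
      have hcc : List.count v (x :: xs) = List.count v xs := by simp [hvx]
      have h' : List.count v xs ≤ f v := by omega
      simp only [skipN, hvx, if_false]
      split_ifs with h1
      · have h'' : List.count v xs ≤ (fun u => if u = x then f x - 1 else f u) v := by simpa [hxv] using h'
        have step := ih (fun u => if u = x then f x - 1 else f u) h''
        have he2 : (fun w => if w = x then f x - 1 else if w = v then f v + 1 else f w)
            = (fun w => if w = v then (fun u => if u = x then f x - 1 else f u) v + 1 else (fun u => if u = x then f x - 1 else f u) w) := by
          funext w; by_cases hw1 : w = x <;> by_cases hw2 : w = v <;> simp [hw1, hw2] <;> simp_all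
        rw [he2, step]
      · congr 1
        exact ih f h'

theorem mem_lastOnly (p : List Int) (v : Int) : v ∈ lastOnly p ↔ v ∈ p := by
  induction p with
  | nil => simp [lastOnly]
  | cons x xs ih =>
    by_cases hx : x ∈ xs
    · simp [lastOnly, hx, ih]
      intro h; subst h; tauto
    · simp [lastOnly, hx, ih]

theorem lastOnly_nodup (p : List Int) : (lastOnly p).Nodup := by
  induction p with
  | nil => simp [lastOnly]
  | cons x xs ih =>
    by_cases hx : x ∈ xs
    · simp [lastOnly, hx, ih]
    · simp [lastOnly, hx, ih, mem_lastOnly]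

theorem lastOnly_snoc (p : List Int) (v : Int) :
    lastOnly (p ++ [v]) = (lastOnly p).filter (fun w => w ≠ v) ++ [v] := by
  induction p with
  | nil => simp [lastOnly]
  | cons x xs ih =>
    by_cases hx : x ∈ xs
    · have : x ∈ xs ++ [v] := by simp [hx]
      simp only [List.cons_append, lastOnly, if_pos this, if_pos hx, ih]
    · by_cases hxv : x = v
      · subst hxv
        have : x ∈ xs ++ [x] := by simp
        simp only [List.cons_append, lastOnly, if_pos this, if_neg hx, ih]
        simp
      · have : ¬ x ∈ xs ++ [v] := by simp [hx, hxv]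
        simp only [List.cons_append, lastOnly, if_neg this, if_neg hx, ih]
        simp [hxv]

theorem firstOnly'_snoc (l : List Int) (x : Int) (s : List Int) :
    firstOnly' (l ++ [x]) s = firstOnly' l s ++ (if x ∈ s ∨ x ∈ l then [] else [x]) := by
  induction l generalizing s with
  | nil => by_cases hx : x ∈ s <;> simp [firstOnly', hx]
  | cons y ys ih =>
    by_cases hy : y ∈ s
    · simp only [List.cons_append, firstOnly', if_pos hy, ih]
      by_cases hxy : x = y
      · subst hxy; simp [hy]
      · simp [hxy]
    · simp only [List.cons_append, firstOnly', if_neg hy, ih, List.cons_append]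
      by_cases hxy : x = y
      · subst hxy; simp
      · simp [hxy, List.mem_append]

theorem firstOnly'_reverse (l : List Int) : (firstOnly' l.reverse []).reverse = lastOnly l := by
  induction l with
  | nil => rfl
  | cons x xs ih =>
    have : (x :: xs).reverse = xs.reverse ++ [x] := by simp
    rw [this, firstOnly'_snoc]
    by_cases hx : x ∈ xs
    · have : x ∈ [] ∨ x ∈ xs.reverse := by simp [hx]
      rw [if_pos this]
      simp [lastOnly, hx, ih]
    · have : ¬ (x ∈ ([]:List Int) ∨ x ∈ xs.reverse) := by simp [hx]
      rw [if_neg this]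
      simp [lastOnly, hx, ih]

theorem count_snoc_ne (p : List Int) (v w : Int) (h : w ≠ v) : (p ++ [v]).count w = p.count w := by
  simp [List.count_append, List.count_singleton]
  omega
theorem qN_snoc_ne (a p : List Int) (v w : Int) (h : w ≠ v) : qN a (p ++ [v]) w = qN a p w := by
  simp [qN, count_snoc_ne p v w h]
theorem qN_true_iff (a p : List Int) (v : Int) :
    qN a p v = true ↔ (a.count v < p.count v ∧ (p.count v - a.count v) % 2 = 1) := by
  simp [qN]
theorem mem_filter_qN (a p : List Int) (v : Int) :
    v ∈ (lastOnly p).filter (qN a p) ↔ qN a p v = true := by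
  constructor
  · intro h; exact (List.mem_filter.mp h).2
  · intro h
    refine List.mem_filter.mpr ⟨(mem_lastOnly p v).mpr ?_, h⟩
    have := (qN_true_iff a p v).mp h
    have hpos : 0 < p.count v := by omega
    exact List.count_pos_iff.mp hpos

theorem A_char (a p : List Int) :
    get_expected_interests a p =
      skipN a (fun v => p.count v) ++ (lastOnly p).filter (qN a p) := by
  induction p using List.reverseRecOn with
  | nil =>
    have h0 : (fun v => List.count v ([]:List Int)) = (fun _ => 0) := by funext v; simp
    simp [get_expected_interests, lastOnly, skipN_zero]
  | append_singleton p v ih =>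
    have hfold : get_expected_interests a (p ++ [v]) =
        (fun new_list item =>
          if !(new_list.contains item) then new_list ++ [item]
          else (PySem.List.remove? new_list item).getD new_list) (get_expected_interests a p) v := by
      simp [get_expected_interests, List.foldl_append]
    rw [hfold, ih]
    dsimp only
    set K := skipN a (fun w => p.count w) with hK
    set T := (lastOnly p).filter (qN a p) with hT
    have hmemK : v ∈ K ↔ p.count v < a.count v := mem_skipN a _ v
    have hmemT : v ∈ T ↔ qN a p v = true := mem_filter_qN a p v
    have hcnt : (fun w => (p ++ [v]).count w) = (fun w => if w = v then p.count v + 1 else p.count w) := by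
      funext w; by_cases hw : w = v
      · subst hw; simp
      · simp [count_snoc_ne p v w hw, hw]
    have hTnd : T.Nodup := (lastOnly_nodup p).filter _
    by_cases hc : p.count v < a.count v
    -- CASE 1: v survives among the originals: A removes it from K
    · have hvK : v ∈ K := hmemK.mpr hc
      have hvKT : v ∈ K ++ T := List.mem_append.mpr (Or.inl hvK)
      have hq : qN a p v = false := by simp [qN]; omega
      have hq' : qN a (p ++ [v]) v = false := by simp [qN]; omega
      rw [if_neg (by simp [hvKT])]
      have hrem : (PySem.List.remove? (K ++ T) v).getD (K ++ T) = (K ++ T).erase v := by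
        rw [PySem.List.remove?_eq_some_erase (K ++ T) v hvKT]; rfl
      rw [hrem, List.erase_append_left _ hvK]
      rw [hK, erase_skipN a _ v (by simpa using hc)]
      rw [hcnt]
      congr 1
      rw [lastOnly_snoc, List.filter_append, List.filter_filter]
      have h2 : ([v]).filter (qN a (p ++ [v])) = [] := by simp [hq']
      rw [h2, List.append_nil, hT]
      apply List.filter_congr
      intro w hw
      by_cases hwv : w = v
      · subst hwv; simp [hq, hq']
      · simp [hwv, qN_snoc_ne a p v w hwv]
    · by_cases hq : qN a p v = true
      -- CASE 2: v is the surviving appended copy: A removes it from T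
      · have hvT : v ∈ T := hmemT.mpr hq
        have hvnK : v ∉ K := fun h => hc (hmemK.mp h)
        have hvKT : v ∈ K ++ T := List.mem_append.mpr (Or.inr hvT)
        have hqiff := (qN_true_iff a p v).mp hq
        rw [if_neg (by simp [hvKT])]
        have hrem : (PySem.List.remove? (K ++ T) v).getD (K ++ T) = (K ++ T).erase v := by
          rw [PySem.List.remove?_eq_some_erase (K ++ T) v hvKT]; rfl
        rw [hrem, List.erase_append_right _ hvnK]
        have hq' : qN a (p ++ [v]) v = false := by simp [qN]; omega
        congr 1
        · rw [hcnt, hK]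
          exact (skipN_sat a (fun w => p.count w) v (by show List.count v a ≤ List.count v p; omega)).symm
        · rw [lastOnly_snoc, List.filter_append, List.filter_filter]
          have h2 : ([v]).filter (qN a (p ++ [v])) = [] := by simp [hq']
          rw [h2, List.append_nil, hT]
          rw [List.Nodup.erase_eq_filter hTnd, hT, List.filter_filter]
          apply List.filter_congr
          intro w hw
          by_cases hwv : w = v
          · subst hwv; simp [hq']
          · simp [hwv, qN_snoc_ne a p v w hwv, Bool.and_comm]
      -- CASE 3: v is absent: A appends it
      · have hvnT : v ∉ T := fun h => hq (hmemT.mp h)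
        have hvnK : v ∉ K := fun h => hc (hmemK.mp h)
        have hvn : v ∉ K ++ T := by simp [hvnK, hvnT]
        have hck : a.count v ≤ p.count v := by omega
        have hqf : ¬(a.count v < p.count v ∧ (p.count v - a.count v) % 2 = 1) := by
          simpa [qN] using hq
        rw [if_pos (by simp [hvnK, hvnT])]
        have hq' : qN a (p ++ [v]) v = true := by simp [qN]; omega
        rw [List.append_assoc]
        congr 1
        · rw [hcnt, hK]
          exact (skipN_sat a (fun w => p.count w) v (by show List.count v a ≤ List.count v p; omega)).symm
        · rw [lastOnly_snoc, List.filter_append, List.filter_filter]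
          have h2 : ([v]).filter (qN a (p ++ [v])) = [v] := by simp [hq']
          rw [h2, hT]
          congr 1
          apply List.filter_congr
          intro u hu
          by_cases huv : u = v
          · have hqe : qN a p v = false := Bool.eq_false_iff.mpr hq
            rw [huv]; simp [hqe]
          · simp [huv, qN_snoc_ne a p v u huv]

theorem B_kept (l : List Int) (d : PySem.Dict Int Int) (acc : List Int) :
    (l.foldl (fun (st : PySem.Dict Int Int × List Int) v =>
      if st.1.getD v 0 > 0 then (st.1.insert v (st.1.getD v 0 - 1), st.2)
      else (st.1, st.2 ++ [v])) (d, acc)).2 = acc ++ skipN l (fun v => (d.getD v 0).toNat) := by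
  induction l generalizing d acc with
  | nil => simp [skipN]
  | cons x xs ih =>
    by_cases hx : d.getD x 0 > 0
    · rw [List.foldl_cons]
      dsimp only
      rw [if_pos hx, ih]
      rw [skipN, if_pos (by simp; omega)]
      congr 2
      funext w
      rw [PySem.Dict.getD_insert]
      by_cases hw : w = x <;> simp [hw]
    · rw [List.foldl_cons]
      dsimp only
      rw [if_neg hx, ih]
      rw [skipN, if_neg (by simp; omega)]
      simp
theorem B_tail (l : List Int) (q : Int → Prop) [DecidablePred q] (s : PySem.Set Int) (acc : List Int) :
    (l.foldl (fun (st : PySem.Set Int × List Int) v =>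
      if !(PySem.Set.contains st.1 v) then
        (PySem.Set.add st.1 v, if q v then st.2 ++ [v] else st.2)
      else st) (s, acc)).2 = acc ++ (firstOnly' l s).filter (fun v => decide (q v)) := by
  induction l generalizing s acc with
  | nil => simp [firstOnly']
  | cons x xs ih =>
    by_cases hx : x ∈ s
    · rw [List.foldl_cons]
      dsimp only
      rw [if_neg (by simp [PySem.Set.contains, hx]), ih]
      simp [firstOnly', hx]
    · rw [List.foldl_cons]
      dsimp only
      rw [if_pos (by simp [PySem.Set.contains, hx])]
      have hadd : PySem.Set.add s x = s ++ [x] := by simp [PySem.Set.add, PySem.Set.contains, hx]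
      rw [hadd, ih]
      by_cases hq : q x
      · simp [firstOnly', hx, hq]
      · simp [firstOnly', hx, hq]

theorem B_char (a b : List Int) :
    get_expected_interests_alt a b =
      skipN a (fun v => b.count v) ++ (lastOnly b).filter (qN a b) := by
  simp only [get_expected_interests_alt, PySem.Dict.foldl_insert_getD_add_one_eq_counter]
  have hbud : (fun v => ((PySem.Dict.counter b).getD v 0).toNat) = (fun v => b.count v) := by
    funext v; rw [PySem.Dict.getD_counter]; exact Int.toNat_natCast _
  have hq : (fun v => decide ((PySem.Dict.counter b).getD v 0 - (PySem.Dict.counter a).getD v 0 > 0 ∧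
      PySem.Int.mod ((PySem.Dict.counter b).getD v 0 - (PySem.Dict.counter a).getD v 0) 2 = 1)) = qN a b := by
    funext v
    rw [PySem.Dict.getD_counter, PySem.Dict.getD_counter]
    rw [qN]
    rw [decide_eq_decide]
    rw [PySem.Int.mod_eq_emod_of_pos (by norm_num)]
    omega
  rw [B_kept]
  congr 1
  · rw [List.nil_append, hbud]
  · refine Eq.trans (congrArg List.reverse (B_tail b.reverse
      (fun v => (PySem.Dict.counter b).getD v 0 - (PySem.Dict.counter a).getD v 0 > 0 ∧
        PySem.Int.mod ((PySem.Dict.counter b).getD v 0 - (PySem.Dict.counter a).getD v 0) 2 = 1)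
      PySem.Set.empty [])) ?_
    rw [List.nil_append, hq, ← List.filter_reverse, show (PySem.Set.empty : List Int) = ([] : List Int) from rfl, firstOnly'_reverse]

-- ===== VERDICT (by name: the statement is the Claim_ definition above) =====
theorem get_expected_interests_spec : Claim_equal_get_expected_interests := by
  intro a b _
  show get_expected_interests a b = get_expected_interests_alt a b
  rw [A_char, B_char]
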